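-- pv_equiv track=rewrite | github.com/VeeraSaiJoshik/AllStateJarvis | solutions/math_nt/sieve.py | factorize_with_spf
-- ===== SOURCE A (Python) =====
-- def factorize_with_spf(x, spf):
--     """Factorize x in O(log x) using precomputed SPF table."""
--     factors = {}
--     while x > 1:
--         p = spf[x]
--         while x % p == 0:
--             factors[p] = factors.get(p, 0) + 1
--             x //= p
--     return factors
-- ===== SOURCE B (Python) =====
-- def factorize_with_spf(x, spf):
--     """Factorize x with a precomputed SPF table: recursively extract the SPF
--     division chain as a list, then group it with a counting comprehension."""
--     def chain(x):
--         return [] if x <= 1 else [spf[x]] + chain(x // spf[x])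
--     primes = chain(x)
--     return {p: primes.count(p) for p in dict.fromkeys(primes)}
-- ===== Notes on version B (the rewrite author's own statement) =====
-- stated objective: alternative
-- what changed: A's nested while-loops accumulating counts into a dict are replaced by two stages: a recursive function that extracts the SPF division chain of x as a plain list (one division per recursive call, no dict), followed by a counting dict-comprehension over dict.fromkeys(primes) using list.count, which yields the same counts in the same first-occurrence key order.
-- outside the precondition, e.g. on factorize_with_spf(8, [0, 0, 2, 3, 4, 5, 6, 7, 2]): A returns {2: 3}, B returns {2: 1, 4: 1}
import Mathlib
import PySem

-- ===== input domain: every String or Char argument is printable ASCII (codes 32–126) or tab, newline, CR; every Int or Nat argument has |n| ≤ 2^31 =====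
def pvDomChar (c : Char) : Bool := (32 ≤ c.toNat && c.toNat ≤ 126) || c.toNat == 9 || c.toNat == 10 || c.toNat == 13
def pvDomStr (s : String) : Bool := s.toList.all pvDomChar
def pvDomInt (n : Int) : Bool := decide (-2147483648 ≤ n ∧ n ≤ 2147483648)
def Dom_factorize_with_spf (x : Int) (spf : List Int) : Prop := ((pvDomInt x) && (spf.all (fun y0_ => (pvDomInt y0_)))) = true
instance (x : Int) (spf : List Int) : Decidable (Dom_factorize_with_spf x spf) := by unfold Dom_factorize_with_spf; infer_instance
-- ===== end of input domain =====

-- B replaces A's nested dict-accumulating loops by a recursive extraction of the SPF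
-- division chain as a list followed by a counting comprehension — objective: alternative.


-- ===== PORT A =====
-- inner 'while x % p == 0' loop of A; the natAbs guard only makes the recursion total
-- (it fails only where the Python loop would not terminate, outside Pre_).
def pvInnerA (x p : Int) (d : PySem.Dict Int Int) : Int × PySem.Dict Int Int :=
  if PySem.Int.mod x p = 0 then
    if h : (PySem.Int.floordiv x p).natAbs < x.natAbs then
      pvInnerA (PySem.Int.floordiv x p) p (d.insert p (d.getD p 0 + 1))
    else (x, d)
  else (x, d)
termination_by x.natAbs
decreasing_by exact h

-- outer 'while x > 1' loop of A; 'none' from pyGet? is Python's IndexError (outside Pre_),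
-- and the natAbs guard again only enforces totality.
def pvOuterA (spf : List Int) (x : Int) (d : PySem.Dict Int Int) : PySem.Dict Int Int :=
  if 1 < x then
    match PySem.List.pyGet? spf x with
    | none => d
    | some p =>
      let r := pvInnerA x p d
      if h : r.1.natAbs < x.natAbs then pvOuterA spf r.1 r.2 else r.2
  else d
termination_by x.natAbs
decreasing_by exact h

def factorize_with_spf (x : Int) (spf : List Int) : List (Int × Int) :=
  (pvOuterA spf x PySem.Dict.empty).items

-- ===== PORT B =====
-- B's recursive 'chain': the list of SPF values along the division chain of x;
-- 'none' from pyGet? is IndexError, and the natAbs guard only makes it total.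
def pvChainB (spf : List Int) (x : Int) : List Int :=
  if 1 < x then
    match PySem.List.pyGet? spf x with
    | none => []
    | some p =>
      if h : (PySem.Int.floordiv x p).natAbs < x.natAbs then
        p :: pvChainB spf (PySem.Int.floordiv x p)
      else [p]
  else []
termination_by x.natAbs
decreasing_by exact h

-- {p: primes.count(p) for p in dict.fromkeys(primes)} — keys of PySem.List.dedup are
-- distinct, so the comprehension's items are exactly this map.
def factorize_with_spf_alt (x : Int) (spf : List Int) : List (Int × Int) :=
  let primes := pvChainB spf x
  (PySem.List.dedup primes).map (fun p => (p, (primes.count p : Int)))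

-- ===== PRECONDITION & SPEC =====
-- Pre_ restricts spf to a genuine smallest-prime-factor table with x in range (or x ≤ 1),
-- the function's documented domain ("precomputed SPF table"); on malformed tables A may
-- raise IndexError/ZeroDivisionError, loop forever, or return a value that depends on its
-- divide-out-fully order, which B's re-read-each-step order legitimately differs on.
def Pre_factorize_with_spf (x : Int) (spf : List Int) : Prop :=
  x ≤ 1 ∨ (x < (spf.length : Int) ∧
    ∀ i : Nat, i < spf.length → 2 ≤ i →
      2 ≤ spf.getD i 0 ∧ (spf.getD i 0).toNat ∣ i ∧
        ∀ d : Nat, d < (spf.getD i 0).toNat → 2 ≤ d → ¬ d ∣ i)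
instance (x : Int) (spf : List Int) : Decidable (Pre_factorize_with_spf x spf) := by
  unfold Pre_factorize_with_spf; infer_instance

def pvWitness_factorize_with_spf : Int × List Int :=
  (12, [0, 0, 2, 3, 2, 5, 2, 7, 2, 3, 2, 11, 2])

def Spec_factorize_with_spf (x : Int) (spf : List Int) (out : List (Int × Int)) : Prop :=
  out = factorize_with_spf_alt x spf
instance (x : Int) (spf : List Int) (out : List (Int × Int)) : Decidable (Spec_factorize_with_spf x spf out) := by
  unfold Spec_factorize_with_spf; infer_instance

-- ===== CLAIM (what is proved, stated in full; the proofs are below) =====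
def Claim_equal_factorize_with_spf : Prop := ∀ (x : Int) (spf : List Int), Dom_factorize_with_spf x spf → Pre_factorize_with_spf x spf → Spec_factorize_with_spf x spf (factorize_with_spf x spf)

-- ===== LEMMAS AND PROOFS =====

-- proof-side helper: a flat loop dividing once per step, used as a bridge between
-- A's nested loops and B's chain list.
def pvLoopB (spf : List Int) (x : Int) (d : PySem.Dict Int Int) : PySem.Dict Int Int :=
  if 1 < x then
    match PySem.List.pyGet? spf x with
    | none => d
    | some p =>
      if h : (PySem.Int.floordiv x p).natAbs < x.natAbs then
        pvLoopB spf (PySem.Int.floordiv x p) (d.insert p (d.getD p 0 + 1))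
      else d.insert p (d.getD p 0 + 1)
  else d
termination_by x.natAbs
decreasing_by exact h

lemma pv_witness_pre :
    Dom_factorize_with_spf pvWitness_factorize_with_spf.1 pvWitness_factorize_with_spf.2 ∧
    Pre_factorize_with_spf pvWitness_factorize_with_spf.1 pvWitness_factorize_with_spf.2 := by
  constructor <;> decide

-- an entry satisfying Pre_'s elementary conditions is the smallest prime factor
lemma pv_entry_minFac {v : Int} {i : Nat} (h2i : 2 ≤ i) (h2 : 2 ≤ v)
    (hdvd : v.toNat ∣ i) (hmin : ∀ d : Nat, d < v.toNat → 2 ≤ d → ¬ d ∣ i) :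
    v = (Nat.minFac i : Int) := by
  have hvn : 2 ≤ v.toNat := by omega
  have h1 : Nat.minFac i ≤ v.toNat := Nat.minFac_le_of_dvd hvn hdvd
  have h2' : 2 ≤ Nat.minFac i := (Nat.minFac_prime (by omega : i ≠ 1)).two_le
  have h3 : ¬ Nat.minFac i < v.toNat := fun hlt => hmin _ hlt h2' (Nat.minFac_dvd i)
  omega

-- arithmetic glue: p ∣ x, 1 ≤ x, 2 ≤ p
lemma pv_div_facts {x p : Int} (hp : 2 ≤ p) (hdvd : p ∣ x) (hx : 1 ≤ x) :
    PySem.Int.floordiv x p = x / p ∧ 1 ≤ x / p ∧ x / p < x := by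
  have hfd := PySem.Int.floordiv_eq_ediv_of_pos (a := x) (b := p) (by omega)
  have hle : p ≤ x := Int.le_of_dvd (by omega) hdvd
  have h1 : 1 ≤ x / p := by rw [Int.le_ediv_iff_mul_le (by omega)]; omega
  have hq : x / p * p = x := Int.ediv_mul_cancel hdvd
  have h2 : x / p < x := by nlinarith
  exact ⟨hfd, h1, h2⟩

-- the smallest prime factor survives one division while it still divides
lemma pv_minFac_div {n : Nat} (h2 : 2 ≤ n) (hd : n.minFac ∣ n / n.minFac) :
    (n / n.minFac).minFac = n.minFac := by
  have hp := Nat.minFac_prime (by omega : n ≠ 1)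
  have hm1 : (n / n.minFac).minFac ≤ n.minFac := Nat.minFac_le_of_dvd hp.two_le hd
  have hne1 : n / n.minFac ≠ 1 := by
    intro h; rw [h] at hd
    have := Nat.eq_one_of_dvd_one hd; have := hp.two_le; omega
  have hq := Nat.minFac_prime hne1
  have hdn : (n / n.minFac).minFac ∣ n :=
    dvd_trans (Nat.minFac_dvd _) (Nat.div_dvd_of_dvd (Nat.minFac_dvd n))
  have hm2 : n.minFac ≤ (n / n.minFac).minFac := Nat.minFac_le_of_dvd hq.two_le hdn
  omega

-- the SPF-table lookup spf[x] seen by both ports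
lemma pv_lookup {spf : List Int}
    (hSPF : ∀ i : Nat, i < spf.length → 2 ≤ i → spf.getD i 0 = (Nat.minFac i : Int))
    {x : Int} (hx : 2 ≤ x) (hlen : x < (spf.length : Int)) :
    PySem.List.pyGet? spf x = some ((Nat.minFac x.toNat : Nat) : Int) := by
  have hlt : x.toNat < spf.length := by omega
  have h := PySem.List.pyGet?_of_nonneg spf (i := x) (by omega)
  rw [h, List.getElem?_eq_getElem hlt, ← List.getD_eq_getElem spf 0 hlt,
    hSPF x.toNat hlt (by omega)]

-- specification of A's inner loop: it fully divides p out of x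
lemma pv_innerA_spec : ∀ (fuel : Nat) (x p : Int) (d : PySem.Dict Int Int),
    x.natAbs ≤ fuel → 2 ≤ p → p ∣ x → 1 ≤ x →
    1 ≤ (pvInnerA x p d).1 ∧ (pvInnerA x p d).1 ∣ x ∧ ¬ p ∣ (pvInnerA x p d).1 ∧
      (pvInnerA x p d).1.natAbs < x.natAbs := by
  intro fuel
  induction fuel with
  | zero => intro x p d hf hp hdvd hx; omega
  | succ n ih =>
    intro x p d hf hp hdvd hx
    obtain ⟨hfd, h1, h2⟩ := pv_div_facts hp hdvd hx
    have hmod : PySem.Int.mod x p = 0 := (PySem.Int.mod_eq_zero_iff_dvd x p).mpr hdvd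
    have hg : (PySem.Int.floordiv x p).natAbs < x.natAbs := by rw [hfd]; omega
    have hxp_dvd : x / p ∣ x := ⟨p, (Int.ediv_mul_cancel hdvd).symm⟩
    rw [pvInnerA, if_pos hmod, dif_pos hg, hfd]
    by_cases hdp : p ∣ (x / p)
    · have hrec := ih (x / p) p (d.insert p (d.getD p 0 + 1)) (by omega) hp hdp h1
      exact ⟨hrec.1, dvd_trans hrec.2.1 hxp_dvd, hrec.2.2.1, by omega⟩
    · have hmod2 : ¬ PySem.Int.mod (x / p) p = 0 :=
        fun h => hdp ((PySem.Int.mod_eq_zero_iff_dvd _ _).mp h)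
      rw [pvInnerA, if_neg hmod2]
      exact ⟨h1, hxp_dvd, hdp, by omega⟩

-- the flat loop absorbs exactly one run of A's inner loop
lemma pv_bridge (spf : List Int)
    (hSPF : ∀ i : Nat, i < spf.length → 2 ≤ i → spf.getD i 0 = (Nat.minFac i : Int)) :
    ∀ (fuel : Nat) (x p : Int) (d : PySem.Dict Int Int),
    x.natAbs ≤ fuel → p ∣ x → 2 ≤ x → x < (spf.length : Int) →
    (Nat.minFac x.toNat : Int) = p →
    pvLoopB spf x d = pvLoopB spf (pvInnerA x p d).1 (pvInnerA x p d).2 := by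
  intro fuel
  induction fuel with
  | zero => intro x p d hf hdvd hx hlen hmin; omega
  | succ n ih =>
    intro x p d hf hdvd hx hlen hmin
    have hp2 : 2 ≤ p := by
      rw [← hmin]
      exact_mod_cast (Nat.minFac_prime (by omega : x.toNat ≠ 1)).two_le
    obtain ⟨hfd, h1, h2⟩ := pv_div_facts hp2 hdvd (by omega)
    have hmod : PySem.Int.mod x p = 0 := (PySem.Int.mod_eq_zero_iff_dvd x p).mpr hdvd
    have hg : (PySem.Int.floordiv x p).natAbs < x.natAbs := by rw [hfd]; omega
    have hget : PySem.List.pyGet? spf x = some p := by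
      rw [pv_lookup hSPF hx hlen, hmin]
    rw [pvInnerA, if_pos hmod, dif_pos hg, hfd]
    conv_lhs => rw [pvLoopB]
    rw [if_pos (show (1:Int) < x by omega), hget]
    simp only []
    rw [dif_pos hg, hfd]
    by_cases hdp : p ∣ (x / p)
    · have hx2' : 2 ≤ x / p := le_trans hp2 (Int.le_of_dvd (by omega) hdp)
      have hdivcast : x / p = ((x.toNat / x.toNat.minFac : Nat) : Int) := by
        rw [Int.natCast_div, hmin, Int.toNat_of_nonneg (by omega : (0:Int) ≤ x)]
      have hdpn : x.toNat.minFac ∣ x.toNat / x.toNat.minFac := by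
        have h := hdp
        rw [hdivcast, ← hmin] at h
        exact_mod_cast h
      have hmin' : (Nat.minFac (x / p).toNat : Int) = p := by
        rw [hdivcast, Int.toNat_natCast, pv_minFac_div (by omega) hdpn, hmin]
      exact ih (x / p) p (d.insert p (d.getD p 0 + 1)) (by omega) hdp hx2'
        (by omega) hmin'
    · have hmod2 : ¬ PySem.Int.mod (x / p) p = 0 :=
        fun h => hdp ((PySem.Int.mod_eq_zero_iff_dvd _ _).mp h)
      rw [pvInnerA, if_neg hmod2]

-- simulation: A's outer loop equals the flat loop on a genuine SPF table
lemma pv_main (spf : List Int)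
    (hSPF : ∀ i : Nat, i < spf.length → 2 ≤ i → spf.getD i 0 = (Nat.minFac i : Int)) :
    ∀ (fuel : Nat) (x : Int) (d : PySem.Dict Int Int),
    x.natAbs ≤ fuel → 1 ≤ x → x < (spf.length : Int) →
    pvOuterA spf x d = pvLoopB spf x d := by
  intro fuel
  induction fuel with
  | zero => intro x d hf hx hlen; omega
  | succ n ih =>
    intro x d hf hx hlen
    by_cases hx2 : 1 < x
    · have hget := pv_lookup hSPF (by omega) hlen
      set p : Int := ((Nat.minFac x.toNat : Nat) : Int) with hp_def
      have hp2 : 2 ≤ p := by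
        rw [hp_def]
        exact_mod_cast (Nat.minFac_prime (by omega : x.toNat ≠ 1)).two_le
      have hdvd : p ∣ x := by
        have h := Nat.minFac_dvd x.toNat
        have : ((Nat.minFac x.toNat : Nat) : Int) ∣ ((x.toNat : Nat) : Int) :=
          Int.natCast_dvd_natCast.mpr h
        rwa [Int.toNat_of_nonneg (by omega : (0:Int) ≤ x)] at this
      have hspec := pv_innerA_spec x.natAbs x p d le_rfl hp2 hdvd (by omega)
      have hbr := pv_bridge spf hSPF x.natAbs x p d le_rfl hdvd (by omega) hlen rfl
      rw [pvOuterA, if_pos hx2, hget]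
      simp only []
      rw [dif_pos hspec.2.2.2, hbr]
      by_cases hr1 : 1 < (pvInnerA x p d).1
      · exact ih (pvInnerA x p d).1 (pvInnerA x p d).2 (by omega) (by omega)
          (lt_of_le_of_lt (Int.le_of_dvd (by omega) hspec.2.1) hlen)
      · rw [pvOuterA, if_neg hr1, pvLoopB, if_neg hr1]
    · rw [pvOuterA, if_neg hx2, pvLoopB, if_neg hx2]

-- the flat loop is the counting fold of B's chain (no side conditions at all)
lemma pv_loop_eq_fold (spf : List Int) : ∀ (fuel : Nat) (x : Int) (d : PySem.Dict Int Int),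
    x.natAbs ≤ fuel →
    pvLoopB spf x d =
      (pvChainB spf x).foldl (fun d p => d.insert p (d.getD p 0 + 1)) d := by
  intro fuel
  induction fuel with
  | zero =>
    intro x d hf
    have hx : ¬ 1 < x := by omega
    rw [pvLoopB, if_neg hx, pvChainB, if_neg hx]; rfl
  | succ n ih =>
    intro x d hf
    by_cases hx : 1 < x
    · rw [pvLoopB, if_pos hx, pvChainB, if_pos hx]
      cases hget : PySem.List.pyGet? spf x with
      | none => rfl
      | some p =>
        simp only []
        by_cases h : (PySem.Int.floordiv x p).natAbs < x.natAbs
        · rw [dif_pos h, dif_pos h, List.foldl_cons]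
          exact ih (PySem.Int.floordiv x p) _ (by omega)
        · rw [dif_neg h, dif_neg h]; rfl
    · rw [pvLoopB, if_neg hx, pvChainB, if_neg hx]; rfl

-- ===== VERDICT (by name: the statement is the Claim_ definition above) =====
theorem factorize_with_spf_spec : Claim_equal_factorize_with_spf := by
  intro x spf _ hpre
  unfold Spec_factorize_with_spf factorize_with_spf
  have hA : pvOuterA spf x PySem.Dict.empty = pvLoopB spf x PySem.Dict.empty := by
    rcases hpre with hle | ⟨hlt, hSPF⟩
    · have hx : ¬ 1 < x := by omega
      rw [pvOuterA, if_neg hx, pvLoopB, if_neg hx]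
    · by_cases hx1 : 1 ≤ x
      · have hSPF' : ∀ i : Nat, i < spf.length → 2 ≤ i →
            spf.getD i 0 = (Nat.minFac i : Int) := by
          intro i hi h2i
          obtain ⟨h2, hdvd, hmin⟩ := hSPF i hi h2i
          exact pv_entry_minFac h2i h2 hdvd hmin
        exact pv_main spf hSPF' x.natAbs x _ le_rfl hx1 hlt
      · have hx : ¬ 1 < x := by omega
        rw [pvOuterA, if_neg hx, pvLoopB, if_neg hx]
  rw [hA, pv_loop_eq_fold spf x.natAbs x PySem.Dict.empty le_rfl,
    PySem.Dict.foldl_insert_getD_add_one_eq_counter, PySem.Dict.items_counter]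
  simp only [factorize_with_spf_alt, PySem.List.dedup_eq_ofList]
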